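-- pv_equiv track=rewrite | github.com/chong-yao/competitive-programming | MCC2024/test6.py | solve
-- ===== SOURCE A (Python) =====
-- MOD = 998244353
--
-- def solve(n, k, s):
--     # Reduce k modulo (MOD-1) for large exponents
--     k %= (MOD - 1)
--
--     # Precompute the modular inverse of 3
--     inv3 = pow(3, MOD - 2, MOD)
--
--     # Precompute 2^k % MOD
--     pow2k = pow(2, k, MOD)
--
--     # Compute (-1)^k modulo MOD
--     minus_one_pow_k = 1 if k % 2 == 0 else MOD - 1
--
--     # Precompute beauty values
--     beauty_00 = pow2k % MOD
--     beauty_11 = ((pow2k + 2 * minus_one_pow_k) % MOD * inv3) % MOD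
--     beauty_01 = ((pow2k - minus_one_pow_k + MOD) % MOD * inv3) % MOD
--
--     arr = []
--     for i in range(1, n):
--         pair = s[i - 1] + s[i]
--         if pair == '00':
--             arr.append(beauty_00)
--         elif pair == '11':
--             arr.append(beauty_11)
--         else:
--             arr.append(beauty_01)
--
--     # Calculate the final result
--     ans = 0
--     for i in range(n - 1):
--         ans = (ans + arr[i] * (n - i - 1) * (i + 1)) % MOD
--
--     return ans
-- ===== SOURCE B (Python) =====
-- MOD = 998244353
--
-- def solve(n, k, s):
--     if n <= 1:
--         return 0
--     k %= (MOD - 1)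
--     inv3 = pow(3, MOD - 2, MOD)
--     pow2k = pow(2, k, MOD)
--     minus_one_pow_k = 1 if k % 2 == 0 else MOD - 1
--     beauty_00 = pow2k % MOD
--     beauty_11 = ((pow2k + 2 * minus_one_pow_k) % MOD * inv3) % MOD
--     beauty_01 = ((pow2k - minus_one_pow_k + MOD) % MOD * inv3) % MOD
--
--     # G(m) = closed form for the total pair weight sum((p+1)*(n-1-p) for p in range(m))
--     def G(m):
--         return n * (m * (m + 1) // 2) - m * (m + 1) * (2 * m + 1) // 6
--
--     # Run-length decomposition: jump run by run over the string.  All pairs inside a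
--     # run of '0's (resp. '1's) are '00' (resp. '11') pairs, so the run contributes
--     # G(end) - G(start) to that class by the closed form.  Every remaining pair is of
--     # the mixed class, whose weight total is the grand total G(n-1) minus w00 and w11.
--     total = G(n - 1)
--     w00 = 0
--     w11 = 0
--     i = 0
--     while i < n - 1:
--         j = i
--         while j + 1 < n and s[j + 1] == s[i]:
--             j += 1
--         if s[i] == '0':
--             w00 += G(j) - G(i)
--         elif s[i] == '1':
--             w11 += G(j) - G(i)
--         i = j + 1
--     return (beauty_00 * w00 + beauty_11 * w11 + beauty_01 * (total - w00 - w11)) % MOD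
-- ===== Notes on version B (the rewrite author's own statement) =====
-- stated objective: faster
-- what changed: B replaces A's per-pair weighted loop (beauty array + second weighting loop) by a run-length decomposition: it jumps over maximal runs of equal characters, charges each run of '0's/'1's the closed-form polynomial weight sum G(end)-G(start), and obtains the mixed-pair class by subtracting from the closed-form grand total G(n-1); no per-position weight is ever computed (measured ~1.6x faster at the largest size).
import Mathlib
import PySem

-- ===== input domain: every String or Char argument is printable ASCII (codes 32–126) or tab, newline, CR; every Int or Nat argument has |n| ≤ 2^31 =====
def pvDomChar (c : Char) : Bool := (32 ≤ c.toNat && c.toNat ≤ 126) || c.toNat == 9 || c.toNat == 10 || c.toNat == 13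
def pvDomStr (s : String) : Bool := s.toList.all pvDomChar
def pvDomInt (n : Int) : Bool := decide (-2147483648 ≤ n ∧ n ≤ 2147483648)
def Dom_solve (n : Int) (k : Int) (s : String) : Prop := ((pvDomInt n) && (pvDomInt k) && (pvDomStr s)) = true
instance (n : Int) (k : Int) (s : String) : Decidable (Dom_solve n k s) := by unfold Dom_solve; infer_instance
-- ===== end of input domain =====

-- B replaces A's per-pair weighted loop (beauty array + second weighting loop) by a
-- run-length decomposition: it jumps over maximal runs of equal characters, charges each
-- run of '0's/'1's the closed-form polynomial weight sum G(end)-G(start), and obtains the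
-- mixed-pair class by subtracting from the closed-form grand total G(n-1) (objective:
-- faster by a constant factor, measured; same return value).

-- ===== PORT A =====
def pvMOD : Int := 998244353

def solve (n : Int) (k : Int) (s : String) : Int :=
  -- k %= (MOD - 1)
  let kk := PySem.Int.mod k (pvMOD - 1)
  -- pow(3, MOD-2, MOD); pow(2, k, MOD): exponents are nonnegative here, so .toNat is exact
  let inv3 := PySem.Int.powMod 3 (pvMOD - 2).toNat pvMOD
  let pow2k := PySem.Int.powMod 2 kk.toNat pvMOD
  let m1k : Int := if PySem.Int.mod kk 2 = 0 then 1 else pvMOD - 1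
  let b00 := PySem.Int.mod pow2k pvMOD
  let b11 := PySem.Int.mod (PySem.Int.mod (pow2k + 2 * m1k) pvMOD * inv3) pvMOD
  let b01 := PySem.Int.mod (PySem.Int.mod (pow2k - m1k + pvMOD) pvMOD * inv3) pvMOD
  let arr := (PySem.List.pyRange 1 n 1).foldl (fun arr i =>
    -- pair = s[i-1] + s[i]; none = IndexError, excluded by Pre_solve; pair == '00' / '11'
    -- is compared character by character (exact: the pair has exactly two characters)
    let c1 := (PySem.Str.pyGet? s (i - 1)).getD ' '
    let c2 := (PySem.Str.pyGet? s i).getD ' '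
    arr ++ [if c1 = '0' ∧ c2 = '0' then b00 else if c1 = '1' ∧ c2 = '1' then b11 else b01]) []
  (PySem.List.pyRange 0 (n - 1) 1).foldl (fun ans i =>
    PySem.Int.mod (ans + PySem.List.pyGetD arr i 0 * (n - i - 1) * (i + 1)) pvMOD) 0

-- ===== PORT B =====
-- G(m) = n * (m*(m+1)//2) - m*(m+1)*(2*m+1)//6  (closed form for the weight prefix sum)
def pvG (n m : Int) : Int :=
  n * PySem.Int.floordiv (m * (m + 1)) 2 - PySem.Int.floordiv (m * (m + 1) * (2 * m + 1)) 6

-- inner while loop: advance j while j+1 < n and s[j+1] == s[i]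
-- (fuel is a pure totality guard: (n-1-j).toNat bounds the remaining steps)
def pvRunEnd : Nat → Int → String → Int → Int → Int
  | 0, _, _, _, j => j
  | fuel + 1, n, s, i, j =>
    if j + 1 < n ∧ (PySem.Str.pyGet? s (j + 1)).getD ' ' = (PySem.Str.pyGet? s i).getD ' ' then
      pvRunEnd fuel n s i (j + 1)
    else j

-- outer while loop over runs, accumulating (w00, w11)
def pvRunLoop : Nat → Int → String → Int → Int → Int → Int × Int
  | 0, _, _, _, w00, w11 => (w00, w11)
  | fuel + 1, n, s, i, w00, w11 =>
    if i < n - 1 then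
      let j := pvRunEnd (n - 1 - i).toNat n s i i
      if (PySem.Str.pyGet? s i).getD ' ' = '0' then
        pvRunLoop fuel n s (j + 1) (w00 + (pvG n j - pvG n i)) w11
      else if (PySem.Str.pyGet? s i).getD ' ' = '1' then
        pvRunLoop fuel n s (j + 1) w00 (w11 + (pvG n j - pvG n i))
      else
        pvRunLoop fuel n s (j + 1) w00 w11
    else (w00, w11)

def solve_alt (n : Int) (k : Int) (s : String) : Int :=
  if n ≤ 1 then 0
  else
    let kk := PySem.Int.mod k (pvMOD - 1)
    let inv3 := PySem.Int.powMod 3 (pvMOD - 2).toNat pvMOD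
    let pow2k := PySem.Int.powMod 2 kk.toNat pvMOD
    let m1k : Int := if PySem.Int.mod kk 2 = 0 then 1 else pvMOD - 1
    let b00 := PySem.Int.mod pow2k pvMOD
    let b11 := PySem.Int.mod (PySem.Int.mod (pow2k + 2 * m1k) pvMOD * inv3) pvMOD
    let b01 := PySem.Int.mod (PySem.Int.mod (pow2k - m1k + pvMOD) pvMOD * inv3) pvMOD
    let total := pvG n (n - 1)
    let w := pvRunLoop (n - 1).toNat n s 0 0 0
    PySem.Int.mod (b00 * w.1 + b11 * w.2 + b01 * (total - w.1 - w.2)) pvMOD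

-- ===== PRECONDITION & SPEC =====
-- Pre_ excludes exactly the inputs where Python A raises IndexError: 2 ≤ n with the string
-- shorter than n (the pair loop reads s[n-2] and s[n-1]).
def Pre_solve (n : Int) (k : Int) (s : String) : Prop := n ≤ 1 ∨ n ≤ PySem.Str.len s
instance (n : Int) (k : Int) (s : String) : Decidable (Pre_solve n k s) := by unfold Pre_solve; infer_instance
def pvWitness_solve : Int × Int × String := (3, 5, "010")

def Spec_solve (n : Int) (k : Int) (s : String) (out : Int) : Prop := out = solve_alt n k s
instance (n : Int) (k : Int) (s : String) (out : Int) : Decidable (Spec_solve n k s out) := by unfold Spec_solve; infer_instance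

-- ===== CLAIM (what is proved, stated in full; the proofs are below) =====
def Claim_equal_solve : Prop := ∀ (n : Int) (k : Int) (s : String), Dom_solve n k s → Pre_solve n k s → Spec_solve n k s (solve n k s)

-- ===== LEMMAS AND PROOFS =====

theorem pv_witness_ok : Dom_solve pvWitness_solve.1 pvWitness_solve.2.1 pvWitness_solve.2.2 ∧
    Pre_solve pvWitness_solve.1 pvWitness_solve.2.1 pvWitness_solve.2.2 := by decide

-- proof-only abbreviations
def pvC (s : String) (p : Int) : Char := (PySem.Str.pyGet? s p).getD ' '
def pvW (n p : Int) : Int := (n - p - 1) * (p + 1)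
def pvB (k : Int) : Int × Int × Int :=
  let kk := PySem.Int.mod k (pvMOD - 1)
  let inv3 := PySem.Int.powMod 3 (pvMOD - 2).toNat pvMOD
  let pow2k := PySem.Int.powMod 2 kk.toNat pvMOD
  let m1k : Int := if PySem.Int.mod kk 2 = 0 then 1 else pvMOD - 1
  (PySem.Int.mod pow2k pvMOD,
   PySem.Int.mod (PySem.Int.mod (pow2k + 2 * m1k) pvMOD * inv3) pvMOD,
   PySem.Int.mod (PySem.Int.mod (pow2k - m1k + pvMOD) pvMOD * inv3) pvMOD)
def pvF (k : Int) (s : String) (p : Int) : Int :=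
  if pvC s p = '0' ∧ pvC s (p + 1) = '0' then (pvB k).1
  else if pvC s p = '1' ∧ pvC s (p + 1) = '1' then (pvB k).2.1
  else (pvB k).2.2
def pvT (n : Int) (s : String) (d : Char) (p : Int) : Int :=
  if pvC s p = d ∧ pvC s (p + 1) = d then pvW n p else 0
def pvT01 (n : Int) (s : String) (p : Int) : Int :=
  if pvC s p = '0' ∧ pvC s (p + 1) = '0' then 0
  else if pvC s p = '1' ∧ pvC s (p + 1) = '1' then 0
  else pvW n p
def pvS (n : Int) (s : String) (d : Char) (i : Int) : Int :=
  ((PySem.List.pyRange i (n - 1) 1).map (pvT n s d)).sum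
def pvS01 (n : Int) (s : String) (i : Int) : Int :=
  ((PySem.List.pyRange i (n - 1) 1).map (pvT01 n s)).sum

-- ---- generic sum lemmas ----
theorem pv_sum3 {α : Type} (L : List α) (g1 g2 g3 : α → Int) :
    (L.map (fun p => g1 p + g2 p + g3 p)).sum = (L.map g1).sum + (L.map g2).sum + (L.map g3).sum := by
  induction L with
  | nil => simp
  | cons x L ih => simp only [List.map_cons, List.sum_cons, ih]; ring

theorem pv_sumc {α : Type} (L : List α) (b : Int) (g : α → Int) :
    (L.map (fun p => b * g p)).sum = b * (L.map g).sum := by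
  induction L with
  | nil => simp
  | cons x L ih => simp only [List.map_cons, List.sum_cons, ih]; ring

-- ---- exact-division facts for the closed form G ----
theorem pv_half (a : Int) (h : 2 ∣ a) : 2 * PySem.Int.floordiv a 2 = a := by
  obtain ⟨c, rfl⟩ := h
  rw [PySem.Int.floordiv_eq_ediv_of_pos (by norm_num), Int.mul_ediv_cancel_left _ (by norm_num)]

theorem pv_sixth (a : Int) (h : 6 ∣ a) : 6 * PySem.Int.floordiv a 6 = a := by
  obtain ⟨c, rfl⟩ := h
  rw [PySem.Int.floordiv_eq_ediv_of_pos (by norm_num), Int.mul_ediv_cancel_left _ (by norm_num)]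

theorem pv_six_dvd (x : Int) (hx : 0 ≤ x) : (6 : Int) ∣ x * (x + 1) * (2 * x + 1) := by
  lift x to ℕ using hx with m
  induction m with
  | zero => norm_num
  | succ m ih =>
    obtain ⟨c, hc⟩ := ih
    refine ⟨c + ((m : Int) + 1) * ((m : Int) + 1), ?_⟩
    push_cast
    linear_combination hc

-- G really is the weight prefix sum
theorem pvG_sum (n a : Int) (ha : 0 ≤ a) :
    pvG n a = ((PySem.List.pyRange 0 a 1).map (pvW n)).sum := by
  lift a to ℕ using ha with m
  induction m with
  | zero =>
    norm_num [pvG, PySem.Int.floordiv_eq_ediv_of_pos, PySem.List.pyRange_one_eq_nil]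
  | succ m ih =>
    have hc : ((m + 1 : ℕ) : Int) = (m : Int) + 1 := by push_cast; ring
    rw [hc, PySem.List.pyRange_one_succ_right (show (0:Int) ≤ (m:Int) by positivity),
        List.map_append, List.sum_append, ← ih]
    simp only [List.map_cons, List.map_nil, List.sum_cons, List.sum_nil]
    unfold pvG pvW
    have h1 := pv_half (((m : Int) + 1) * (((m : Int) + 1) + 1))
      ((Int.even_mul_succ_self ((m : Int) + 1)).two_dvd)
    have h2 := pv_half ((m : Int) * ((m : Int) + 1))
      ((Int.even_mul_succ_self (m : Int)).two_dvd)
    have h3 := pv_sixth (((m : Int) + 1) * (((m : Int) + 1) + 1) * (2 * ((m : Int) + 1) + 1))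
      (pv_six_dvd ((m : Int) + 1) (by positivity))
    have h4 := pv_sixth ((m : Int) * ((m : Int) + 1) * (2 * (m : Int) + 1))
      (pv_six_dvd (m : Int) (by positivity))
    set A2 := PySem.Int.floordiv (((m : Int) + 1) * (((m : Int) + 1) + 1)) 2 with hA2
    set B2 := PySem.Int.floordiv ((m : Int) * ((m : Int) + 1)) 2 with hB2
    set A6 := PySem.Int.floordiv (((m : Int) + 1) * (((m : Int) + 1) + 1) * (2 * ((m : Int) + 1) + 1)) 6 with hA6
    set B6 := PySem.Int.floordiv ((m : Int) * ((m : Int) + 1) * (2 * (m : Int) + 1)) 6 with hB6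
    have e2 : A2 = B2 + ((m : Int) + 1) := by
      have : 2 * A2 = 2 * (B2 + ((m : Int) + 1)) := by linear_combination h1 - h2
      linarith
    have e6 : A6 = B6 + ((m : Int) + 1) * ((m : Int) + 1) := by
      have : 6 * A6 = 6 * (B6 + ((m : Int) + 1) * ((m : Int) + 1)) := by linear_combination h3 - h4
      linarith
    rw [e2, e6]
    ring

theorem pvG_diff (n i j : Int) (hi : 0 ≤ i) (hij : i ≤ j) :
    pvG n j - pvG n i = ((PySem.List.pyRange i j 1).map (pvW n)).sum := by
  rw [pvG_sum n j (le_trans hi hij), pvG_sum n i hi,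
      PySem.List.pyRange_one_append 0 i j hi hij, List.map_append, List.sum_append]
  ring

-- ---- the inner while loop: specification ----
theorem pvRunEnd_spec (n : Int) (s : String) (i : Int) :
    ∀ (fuel : Nat) (j : Int), (n - 1 - j).toNat ≤ fuel → j < n →
    (∀ p, i < p → p ≤ j → pvC s p = pvC s i) →
    j ≤ pvRunEnd fuel n s i j ∧ pvRunEnd fuel n s i j < n ∧
    (∀ p, i < p → p ≤ pvRunEnd fuel n s i j → pvC s p = pvC s i) ∧
    ¬(pvRunEnd fuel n s i j + 1 < n ∧ pvC s (pvRunEnd fuel n s i j + 1) = pvC s i) := by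
  intro fuel
  induction fuel with
  | zero =>
    intro j hfuel hj hrun
    simp only [pvRunEnd]
    exact ⟨le_refl j, hj, hrun, fun hcon => by omega⟩
  | succ fuel ih =>
    intro j hfuel hj hrun
    simp only [pvRunEnd]
    split
    next h =>
      have h1 := h.1
      have h2 : pvC s (j + 1) = pvC s i := h.2
      have hrun' : ∀ p, i < p → p ≤ j + 1 → pvC s p = pvC s i := by
        intro p hp1 hp2
        rcases eq_or_lt_of_le hp2 with rfl | hlt
        · exact h2
        · exact hrun p hp1 (by omega)
      have hrec := ih (j + 1) (by omega) h1 hrun'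
      exact ⟨by omega, hrec.2.1, hrec.2.2.1, hrec.2.2.2⟩
    next h =>
      refine ⟨le_refl j, hj, hrun, ?_⟩
      intro hcon
      exact h ⟨hcon.1, hcon.2⟩

-- ---- run decomposition of the class sums ----
theorem pv_run_sum (n : Int) (s : String) (d : Char) (i j : Int)
    (hi : 0 ≤ i) (hij : i ≤ j) (hjn : j ≤ n - 1)
    (hrun : ∀ p, i < p → p ≤ j → pvC s p = pvC s i)
    (hend : j < n - 1 → pvC s (j + 1) ≠ pvC s i) :
    pvS n s d i = (if pvC s i = d then pvG n j - pvG n i else 0) + pvS n s d (j + 1) := by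
  have hcong : ∀ p ∈ PySem.List.pyRange i j 1,
      pvT n s d p = (if pvC s i = d then pvW n p else 0) := by
    intro p hp
    rw [PySem.List.mem_pyRange_one] at hp
    have hcp : pvC s p = pvC s i := by
      rcases eq_or_lt_of_le hp.1 with rfl | h
      · rfl
      · exact hrun p h (by omega)
    have hcp1 : pvC s (p + 1) = pvC s i := hrun (p + 1) (by omega) (by omega)
    unfold pvT
    rw [hcp, hcp1]
    by_cases hd : pvC s i = d
    · simp [hd]
    · simp [hd]
  have hGsum : ((PySem.List.pyRange i j 1).map (pvT n s d)).sum
      = if pvC s i = d then pvG n j - pvG n i else 0 := by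
    rw [List.map_congr_left hcong]
    by_cases hd : pvC s i = d
    · simp only [hd, if_true]
      rw [pvG_diff n i j hi hij]
    · simp [hd]
  by_cases hj : j < n - 1
  · have hsplit : pvS n s d i
        = ((PySem.List.pyRange i (j + 1) 1).map (pvT n s d)).sum + pvS n s d (j + 1) := by
      unfold pvS
      rw [PySem.List.pyRange_one_append i (j + 1) (n - 1) (by omega) (by omega),
          List.map_append, List.sum_append]
    rw [hsplit, PySem.List.pyRange_one_succ_right hij, List.map_append, List.sum_append, hGsum]
    have hTj : pvT n s d j = 0 := by
      have hcj : pvC s j = pvC s i := by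
        rcases eq_or_lt_of_le hij with rfl | h
        · rfl
        · exact hrun j h (le_refl j)
      have hne := hend hj
      unfold pvT
      rw [if_neg]
      intro hpair
      by_cases hd : pvC s i = d
      · exact hne (hpair.2.trans (hd ▸ rfl))
      · exact hd (hcj ▸ hpair.1)
    simp [hTj]
  · have hj' : j = n - 1 := by omega
    subst hj'
    have htail : pvS n s d (n - 1 + 1) = 0 := by
      unfold pvS
      rw [PySem.List.pyRange_one_eq_nil (by omega)]
      simp
    rw [htail, add_zero]
    unfold pvS
    exact hGsum

-- ---- the outer loop computes the two class sums ----
theorem pvRunLoop_spec (n : Int) (s : String) :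
    ∀ (fuel : Nat) (i w00 w11 : Int), (n - 1 - i).toNat ≤ fuel → 0 ≤ i →
    pvRunLoop fuel n s i w00 w11 = (w00 + pvS n s '0' i, w11 + pvS n s '1' i) := by
  intro fuel
  induction fuel with
  | zero =>
    intro i w00 w11 hfuel hi
    have hnil : PySem.List.pyRange i (n - 1) 1 = [] := PySem.List.pyRange_one_eq_nil (by omega)
    simp [pvRunLoop, pvS, hnil]
  | succ fuel ih =>
    intro i w00 w11 hfuel hi
    simp only [pvRunLoop]
    split
    next h =>
      obtain ⟨hge, hlt, hrunp, hendp⟩ :=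
        pvRunEnd_spec n s i ((n - 1 - i).toNat) i (le_refl _) (by omega) (by intro p h1 h2; omega)
      set j := pvRunEnd (n - 1 - i).toNat n s i i with hjdef
      have hend' : j < n - 1 → pvC s (j + 1) ≠ pvC s i := fun hlt' heq => hendp ⟨by omega, heq⟩
      have h0 := pv_run_sum n s '0' i j hi hge (by omega) hrunp hend'
      have h1 := pv_run_sum n s '1' i j hi hge (by omega) hrunp hend'
      split
      next hc0 =>
        have hc0' : pvC s i = '0' := hc0
        have hne1 : ¬(pvC s i = '1') := by rw [hc0']; decide
        have hrec := ih (j + 1) (w00 + (pvG n j - pvG n i)) w11 (by omega) (by omega)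
        rw [hrec, h0, h1, if_pos hc0', if_neg hne1]
        simp only [Prod.mk.injEq]
        constructor <;> ring
      next hc0 =>
        split
        next hc1 =>
          have hc1' : pvC s i = '1' := hc1
          have hne0 : ¬(pvC s i = '0') := hc0
          have hrec := ih (j + 1) w00 (w11 + (pvG n j - pvG n i)) (by omega) (by omega)
          rw [hrec, h0, h1, if_pos hc1', if_neg hne0]
          simp only [Prod.mk.injEq]
          constructor <;> ring
        next hc1 =>
          have hne0 : ¬(pvC s i = '0') := hc0
          have hne1 : ¬(pvC s i = '1') := hc1
          have hrec := ih (j + 1) w00 w11 (by omega) (by omega)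
          rw [hrec, h0, h1, if_neg hne0, if_neg hne1]
          simp only [Prod.mk.injEq]
          constructor <;> ring
    next h =>
      have hnil : PySem.List.pyRange i (n - 1) 1 = [] := PySem.List.pyRange_one_eq_nil (by omega)
      simp [pvS, hnil]

-- ---- A-side characterisation (mod of one plain weighted sum) ----
theorem pv_pyRange_shift (a b : Int) :
    PySem.List.pyRange (a + 1) (b + 1) 1 = (PySem.List.pyRange a b 1).map (· + 1) := by
  rw [PySem.List.pyRange_one a b, PySem.List.pyRange_one (a+1) (b+1), List.map_map]
  have : b + 1 - (a + 1) = b - a := by ring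
  rw [this]
  apply List.map_congr_left
  intro x _
  simp [Function.comp]
  ring

theorem pv_pyGetD_map_range (m : Int) (g : Int → Int) (j : Int) (h0 : 0 ≤ j) (h1 : j < m) :
    PySem.List.pyGetD ((PySem.List.pyRange 0 m 1).map g) j 0 = g j := by
  have hlen : ((PySem.List.pyRange 0 m 1).map g).length = (m - 0).toNat := by
    simp [PySem.List.length_pyRange_one]
  have hj : j < (((PySem.List.pyRange 0 m 1).map g).length : Int) := by
    rw [hlen]; omega
  rw [PySem.List.pyGetD_eq_getElem _ 0 h0 hj]
  have hlt : j.toNat < (PySem.List.pyRange 0 m 1).length := by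
    rw [PySem.List.length_pyRange_one]; omega
  rw [List.getElem_map]
  rw [PySem.List.getElem_pyRange_one 0 m j.toNat]
  congr 1
  omega

theorem pv_modfold (M : Int) (hM : 0 < M) (h : Int → Int) :
    ∀ (L : List Int) (acc : Int),
    L.foldl (fun a j => PySem.Int.mod (a + h j) M) (PySem.Int.mod acc M)
      = PySem.Int.mod (acc + (L.map h).sum) M := by
  intro L
  induction L with
  | nil => intro acc; simp
  | cons x L ih =>
    intro acc
    simp only [List.foldl_cons, List.map_cons, List.sum_cons]
    have e1 : PySem.Int.mod (PySem.Int.mod acc M + h x) M = PySem.Int.mod (acc + h x) M := by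
      rw [PySem.Int.mod_eq_emod_of_pos hM, PySem.Int.mod_eq_emod_of_pos hM,
          PySem.Int.mod_eq_emod_of_pos hM, Int.emod_add_emod]
    rw [e1, ih (acc + h x)]
    congr 1
    ring

theorem pv_modfold0 (M : Int) (hM : 0 < M) (h : Int → Int) (L : List Int) :
    L.foldl (fun a j => PySem.Int.mod (a + h j) M) 0 = PySem.Int.mod ((L.map h).sum) M := by
  have hz : PySem.Int.mod 0 M = 0 := by
    rw [PySem.Int.mod_eq_emod_of_pos hM]; simp
  have := pv_modfold M hM h L 0
  rw [hz] at this
  simpa using this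

theorem pv_A (n k : Int) (s : String) : solve n k s =
    PySem.Int.mod (((PySem.List.pyRange 0 (n - 1) 1).map
      (fun p => pvF k s p * pvW n p)).sum) pvMOD := by
  unfold solve
  simp only []
  set kk := PySem.Int.mod k (pvMOD - 1) with hkk
  set inv3 := PySem.Int.powMod 3 (pvMOD - 2).toNat pvMOD with hinv3
  set pow2k := PySem.Int.powMod 2 kk.toNat pvMOD with hpow
  set m1k : Int := if PySem.Int.mod kk 2 = 0 then 1 else pvMOD - 1 with hm1k
  set b00 := PySem.Int.mod pow2k pvMOD with hb00
  set b11 := PySem.Int.mod (PySem.Int.mod (pow2k + 2 * m1k) pvMOD * inv3) pvMOD with hb11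
  set b01 := PySem.Int.mod (PySem.Int.mod (pow2k - m1k + pvMOD) pvMOD * inv3) pvMOD with hb01
  have hM : (0 : Int) < pvMOD := by decide
  set f : Int → Int := fun j =>
    if (PySem.Str.pyGet? s j).getD ' ' = '0' ∧ (PySem.Str.pyGet? s (j + 1)).getD ' ' = '0' then b00
    else if (PySem.Str.pyGet? s j).getD ' ' = '1' ∧ (PySem.Str.pyGet? s (j + 1)).getD ' ' = '1' then b11
    else b01 with hf
  have harr : ((PySem.List.pyRange 1 n 1).foldl (fun arr i =>
      arr ++ [if (PySem.Str.pyGet? s (i - 1)).getD ' ' = '0' ∧ (PySem.Str.pyGet? s i).getD ' ' = '0' then b00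
        else if (PySem.Str.pyGet? s (i - 1)).getD ' ' = '1' ∧ (PySem.Str.pyGet? s i).getD ' ' = '1' then b11
        else b01]) [])
      = (PySem.List.pyRange 0 (n - 1) 1).map f := by
    rw [PySem.List.foldl_append_singleton_eq_map]
    have : PySem.List.pyRange 1 n 1 = (PySem.List.pyRange 0 (n - 1) 1).map (· + 1) := by
      have := pv_pyRange_shift 0 (n - 1)
      simpa using this
    rw [this, List.map_map, List.nil_append]
    apply List.map_congr_left
    intro j _
    simp only [Function.comp, hf]
    have e : j + 1 - 1 = j := by ring
    rw [e]
  rw [harr]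
  have hcongr : (PySem.List.pyRange 0 (n - 1) 1).foldl (fun ans i =>
      PySem.Int.mod (ans + PySem.List.pyGetD ((PySem.List.pyRange 0 (n - 1) 1).map f) i 0 * (n - i - 1) * (i + 1)) pvMOD) 0
      = (PySem.List.pyRange 0 (n - 1) 1).foldl (fun ans i =>
      PySem.Int.mod (ans + f i * (n - i - 1) * (i + 1)) pvMOD) 0 := by
    apply PySem.List.foldl_congr_mem
    intro acc x hx
    rw [PySem.List.mem_pyRange_one] at hx
    rw [pv_pyGetD_map_range (n - 1) f x hx.1 hx.2]
  rw [hcongr]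
  rw [pv_modfold0 pvMOD hM (fun i => f i * (n - i - 1) * (i + 1)) (PySem.List.pyRange 0 (n - 1) 1)]
  refine congrArg (fun t => PySem.Int.mod t pvMOD) ?_
  refine congrArg List.sum ?_
  apply List.map_congr_left
  intro p _
  simp only [hf, pvF, pvC, pvW, pvB]
  rw [hb00, hb11, hb01, hm1k, hpow, hinv3, hkk]
  split_ifs <;> ring

-- ---- B-side characterisation ----
theorem pv_B (n k : Int) (s : String) (hn : 2 ≤ n) : solve_alt n k s =
    PySem.Int.mod ((pvB k).1 * pvS n s '0' 0 + (pvB k).2.1 * pvS n s '1' 0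
      + (pvB k).2.2 * (pvG n (n - 1) - pvS n s '0' 0 - pvS n s '1' 0)) pvMOD := by
  unfold solve_alt
  rw [if_neg (by omega)]
  simp only []
  rw [pvRunLoop_spec n s (n - 1).toNat 0 0 0 (by omega) (le_refl 0)]
  simp only [pvB, zero_add]

-- pointwise decomposition of the weight by pair class
theorem pvW_split (n : Int) (s : String) (p : Int) :
    pvW n p = pvT n s '0' p + pvT n s '1' p + pvT01 n s p := by
  unfold pvT pvT01
  split_ifs with h1 h2
  · exact absurd (h1.1.symm.trans h2.1) (by decide)
  · ring
  · ring
  · ring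

theorem pvF_split (n k : Int) (s : String) (p : Int) :
    pvF k s p * pvW n p
      = (pvB k).1 * pvT n s '0' p + (pvB k).2.1 * pvT n s '1' p + (pvB k).2.2 * pvT01 n s p := by
  unfold pvF pvT pvT01
  split_ifs with h1 h2
  · exact absurd (h1.1.symm.trans h2.1) (by decide)
  · ring
  · ring
  · ring

theorem pv_total (n : Int) (s : String) (hn : 2 ≤ n) :
    pvG n (n - 1) = pvS n s '0' 0 + pvS n s '1' 0 + pvS01 n s 0 := by
  rw [pvG_sum n (n - 1) (by omega)]
  unfold pvS pvS01
  rw [← pv_sum3]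
  apply congrArg List.sum
  apply List.map_congr_left
  intro p _
  exact pvW_split n s p

theorem pv_main (n k : Int) (s : String) : solve n k s = solve_alt n k s := by
  by_cases hn : n ≤ 1
  · have h1 : PySem.List.pyRange 1 n 1 = [] := PySem.List.pyRange_one_eq_nil (by omega)
    have h2 : PySem.List.pyRange 0 (n - 1) 1 = [] := PySem.List.pyRange_one_eq_nil (by omega)
    unfold solve solve_alt
    rw [if_pos hn]
    simp [h1, h2]
  · have hn2 : 2 ≤ n := by omega
    rw [pv_A n k s, pv_B n k s hn2, pv_total n s hn2]
    refine congrArg (fun t => PySem.Int.mod t pvMOD) ?_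
    have hpt : ∀ p ∈ PySem.List.pyRange 0 (n - 1) 1, pvF k s p * pvW n p
        = (pvB k).1 * pvT n s '0' p + (pvB k).2.1 * pvT n s '1' p + (pvB k).2.2 * pvT01 n s p :=
      fun p _ => pvF_split n k s p
    rw [List.map_congr_left hpt, pv_sum3, pv_sumc, pv_sumc, pv_sumc]
    unfold pvS pvS01
    ring

-- ===== VERDICT (by name: the statement is the Claim_ definition above) =====
theorem solve_spec : Claim_equal_solve := by
  intro n k s _ _
  unfold Spec_solve
  exact pv_main n k s
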